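-- pv_equiv track=rewrite | github.com/rohanhpatel/adventOfCode | 2023/day1/part2.py | isValidDigit
-- ===== SOURCE A (Python) =====
-- def isValidDigit(s, ind, forward=True):
--     digitList = {"one": "1", "two": "2", "three": "3", "four": "4", "five": "5", "six": "6", "seven": "7", "eight": "8", "nine": "9"}
--     for i in range(3, 6):
--         start = ind
--         end = ind + i
--         diff = 0
--         if not forward:
--             diff = i - 1
--         substring = s[start-diff:end-diff]
--         if substring in digitList:
--             return digitList[substring]
--     if s[ind].isdigit():
--         return s[ind]
--     else:
--         return None
-- ===== SOURCE B (Python) =====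
-- def isValidDigit(s, ind, forward=True):
--     # Trie-style dispatch on the character at ind: no dict, no loop over lengths.
--     c = s[ind]
--     if forward:
--         def m(w):
--             return s[ind:ind + len(w)] == w
--         if c == 'o':
--             if m("one"): return "1"
--         elif c == 't':
--             if m("two"): return "2"
--             if m("three"): return "3"
--         elif c == 'f':
--             if m("four"): return "4"
--             if m("five"): return "5"
--         elif c == 's':
--             if m("six"): return "6"
--             if m("seven"): return "7"
--         elif c == 'e':
--             if m("eight"): return "8"
--         elif c == 'n':
--             if m("nine"): return "9"
--     else:
--         def m(w):
--             return s[ind + 1 - len(w):ind + 1] == w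
--         if c == 'e':
--             if m("one"): return "1"
--             if m("three"): return "3"
--             if m("five"): return "5"
--             if m("nine"): return "9"
--         elif c == 'o':
--             if m("two"): return "2"
--         elif c == 'r':
--             if m("four"): return "4"
--         elif c == 'x':
--             if m("six"): return "6"
--         elif c == 'n':
--             if m("seven"): return "7"
--         elif c == 't':
--             if m("eight"): return "8"
--     return c if c.isdigit() else None
-- ===== Notes on version B (the rewrite author's own statement) =====
-- stated objective: alternative
-- what changed: Replaces the dict of spelled digits and the loop over candidate lengths 3..5 with a loop-free, dict-free decision tree that dispatches on the single character at ind (first char forward, last char backward) and then tests only the one or two words that can start/end with that character.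
-- outside the precondition, e.g. on isValidDigit('two1t', -6, True): A returns '2', B raises IndexError; on isValidDigit('h7wrsix', 8, False): A returns '6', B raises IndexError
import Mathlib
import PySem

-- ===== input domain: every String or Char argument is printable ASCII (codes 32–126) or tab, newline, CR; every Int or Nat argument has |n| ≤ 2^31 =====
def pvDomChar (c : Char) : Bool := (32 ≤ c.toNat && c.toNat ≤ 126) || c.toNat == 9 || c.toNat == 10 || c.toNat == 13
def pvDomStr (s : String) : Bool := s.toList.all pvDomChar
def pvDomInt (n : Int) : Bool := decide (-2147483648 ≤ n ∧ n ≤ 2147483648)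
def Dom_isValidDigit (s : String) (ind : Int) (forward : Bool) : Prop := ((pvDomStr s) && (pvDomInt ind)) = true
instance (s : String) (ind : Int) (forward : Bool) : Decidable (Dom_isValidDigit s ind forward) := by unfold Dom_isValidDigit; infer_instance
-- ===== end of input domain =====

-- B replaces A's dict of spelled digits and its loop over candidate lengths 3..5 by a loop-free,
-- dict-free decision tree dispatching on the single character s[ind] (first char forward, last char
-- backward), then testing only the one or two words possible for that character: alternative, same
-- cost. Equality of the return value is proved for every in-range index ind.

-- ===== PORT A =====
def pvDigitListA : PySem.Dict String String :=
  PySem.Dict.ofList [("one","1"),("two","2"),("three","3"),("four","4"),("five","5"),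
                     ("six","6"),("seven","7"),("eight","8"),("nine","9")]

-- `return s[ind] if s[ind].isdigit() else None`
def pvFallback (s : String) (ind : Int) : Option String :=
  match PySem.Str.pyGet? s ind with
  | some c => if PySem.Chars.strIsdigit [c] then some (String.ofList [c]) else none
  | none => none   -- IndexError: excluded by Pre_isValidDigit

def pvGoA (s : String) (ind : Int) (forward : Bool) : List Int → Option String
  | [] => pvFallback s ind
  | i :: rest =>
    let strt : Int := ind
    let stop : Int := ind + i
    let diff : Int := if forward then 0 else i - 1
    let substring : String := PySem.Str.slice s (some (strt - diff)) (some (stop - diff))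
    match pvDigitListA.get? substring with
    | some d => some d
    | none => pvGoA s ind forward rest

def isValidDigit (s : String) (ind : Int) (forward : Bool) : Option String :=
  pvGoA s ind forward (PySem.List.pyRange 3 6 1)

-- ===== PORT B =====
-- the local helper `m(w)` of Source B, forward and backward form
def pvMF (s : String) (ind : Int) (w : String) : Bool :=
  PySem.Str.slice s (some ind) (some (ind + PySem.Str.len w)) == w
def pvMB (s : String) (ind : Int) (w : String) : Bool :=
  PySem.Str.slice s (some (ind + 1 - PySem.Str.len w)) (some (ind + 1)) == w

def isValidDigit_alt (s : String) (ind : Int) (forward : Bool) : Option String :=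
  match PySem.Str.pyGet? s ind with
  | none => none   -- IndexError on `c = s[ind]`: excluded by Pre_isValidDigit
  | some c =>
    let fb : Option String :=
      if PySem.Chars.strIsdigit [c] then some (String.ofList [c]) else none
    if forward then
      if c = 'o' then (if pvMF s ind "one" then some "1" else fb)
      else if c = 't' then
        (if pvMF s ind "two" then some "2"
         else if pvMF s ind "three" then some "3" else fb)
      else if c = 'f' then
        (if pvMF s ind "four" then some "4"
         else if pvMF s ind "five" then some "5" else fb)
      else if c = 's' then
        (if pvMF s ind "six" then some "6"
         else if pvMF s ind "seven" then some "7" else fb)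
      else if c = 'e' then (if pvMF s ind "eight" then some "8" else fb)
      else if c = 'n' then (if pvMF s ind "nine" then some "9" else fb)
      else fb
    else
      if c = 'e' then
        (if pvMB s ind "one" then some "1"
         else if pvMB s ind "three" then some "3"
         else if pvMB s ind "five" then some "5"
         else if pvMB s ind "nine" then some "9" else fb)
      else if c = 'o' then (if pvMB s ind "two" then some "2" else fb)
      else if c = 'r' then (if pvMB s ind "four" then some "4" else fb)
      else if c = 'x' then (if pvMB s ind "six" then some "6" else fb)
      else if c = 'n' then (if pvMB s ind "seven" then some "7" else fb)
      else if c = 't' then (if pvMB s ind "eight" then some "8" else fb)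
      else fb

-- ===== PRECONDITION & SPEC =====
-- Pre_ excludes out-of-range ind (ind < -len(s) or len(s) <= ind): there A normally raises
-- IndexError, and the rare inputs where it still returns a digit do so only through Python's
-- negative-index wraparound / slice clamping accident (B raises IndexError on `c = s[ind]` there).
def Pre_isValidDigit (s : String) (ind : Int) (forward : Bool) : Prop :=
  -(s.toList.length : Int) ≤ ind ∧ ind < (s.toList.length : Int)
instance (s : String) (ind : Int) (forward : Bool) : Decidable (Pre_isValidDigit s ind forward) := by
  unfold Pre_isValidDigit; infer_instance

def pvWitness_isValidDigit : String × Int × Bool := ("six7", 1, true)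

def Spec_isValidDigit (s : String) (ind : Int) (forward : Bool) (out : Option String) : Prop :=
  out = isValidDigit_alt s ind forward
instance (s : String) (ind : Int) (forward : Bool) (out : Option String) :
    Decidable (Spec_isValidDigit s ind forward out) := by unfold Spec_isValidDigit; infer_instance

-- ===== CLAIM (what is proved, stated in full; the proofs are below) =====
def Claim_equal_isValidDigit : Prop := ∀ (s : String) (ind : Int) (forward : Bool),
  Dom_isValidDigit s ind forward → Pre_isValidDigit s ind forward →
  Spec_isValidDigit s ind forward (isValidDigit s ind forward)

-- ===== LEMMAS AND PROOFS =====

-- A's word table as a plain association list, and A's dict lookup over it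
def pvWL : List (String × String) :=
  [("one","1"),("two","2"),("three","3"),("four","4"),("five","5"),
   ("six","6"),("seven","7"),("eight","8"),("nine","9")]

def pvLookup (x : String) : Option String := (pvWL.find? (fun p => p.1 == x)).map (·.2)

-- abstract form of A's loop
def pvLoopA (m : Int → String) (fb : Option String) : List Int → Option String
  | [] => fb
  | i :: r =>
    match pvLookup (m i) with
    | some d => some d
    | none => pvLoopA m fb r

-- the window A slices at length i, and the test B runs for word w
def pvWin (s : String) (ind : Int) (forward : Bool) (i : Int) : String :=
  if forward then PySem.Str.slice s (some ind) (some (ind + i))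
  else PySem.Str.slice s (some (ind + 1 - i)) (some (ind + 1))

def pvTest (s : String) (ind : Int) (forward : Bool) (w : String) : Bool :=
  if forward then pvMF s ind w else pvMB s ind w

theorem pv_itemsA : pvDigitListA.items = pvWL := by decide

theorem pv_getA_eq (x : String) : pvDigitListA.get? x = pvLookup x := by
  simp [PySem.Dict.get?, pv_itemsA, pvLookup]

-- clampIdx as plain integer arithmetic
theorem pv_clampIdx_spec (n : ℕ) (i : ℤ) :
    (PySem.List.clampIdx n i : ℤ) = if i < 0 then max (n + i) 0 else min i n := by
  unfold PySem.List.clampIdx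
  split_ifs <;> omega

theorem pv_slice_eq {α : Type} (t : List α) (a b : ℤ) :
    PySem.List.slice t (some a) (some b) =
      (t.drop (PySem.List.clampIdx t.length a)).take
        (PySem.List.clampIdx t.length b - PySem.List.clampIdx t.length a) := rfl

-- ===== forward normalisation =====
theorem pv_NF_fwd_pos (t : List Char) (ind j : ℤ) (h3 : 3 ≤ j)
    (hlo : -(t.length : ℤ) ≤ ind) (hhi : ind < t.length) (hc : 0 ≤ ind ∨ ind + j < 0) :
    PySem.List.slice t (some ind) (some (ind + j)) =
      (t.drop (PySem.List.clampIdx t.length ind)).take j.toNat := by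
  rw [pv_slice_eq, List.take_eq_take_iff]
  have c1 := pv_clampIdx_spec t.length ind
  have c2 := pv_clampIdx_spec t.length (ind + j)
  simp only [List.length_drop]
  rcases hc with h | h
  · rw [if_neg (by omega)] at c1
    rw [if_neg (by omega)] at c2
    omega
  · rw [if_pos (by omega)] at c1
    rw [if_pos h] at c2
    omega

theorem pv_NF_fwd_junk (t : List Char) (ind j : ℤ) (h3 : 3 ≤ j) (h5 : j ≤ 5)
    (hlo : -(t.length : ℤ) ≤ ind) (hc : ind < 0) (hc2 : 0 ≤ ind + j) :
    (PySem.List.slice t (some ind) (some (ind + j))).length < 3 := by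
  rw [PySem.List.length_slice]
  have c1 := pv_clampIdx_spec t.length ind
  have c2 := pv_clampIdx_spec t.length (ind + j)
  rw [if_pos hc] at c1
  rw [if_neg (by omega)] at c2
  omega

-- ===== backward normalisation =====
theorem pv_NF_bwd_pos (t : List Char) (ind j : ℤ) (h3 : 3 ≤ j)
    (hlo : -(t.length : ℤ) ≤ ind) (hhi : ind < t.length) (hc : ind < 0 ∨ j ≤ ind + 1) :
    PySem.List.slice t (some (ind + 1 - j)) (some (ind + 1)) =
      (t.take (PySem.List.clampIdx t.length (ind + 1))).drop
        (PySem.List.clampIdx t.length (ind + 1) - j.toNat) := by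
  rw [pv_slice_eq, List.drop_take]
  have c1 := pv_clampIdx_spec t.length (ind + 1 - j)
  have c2 := pv_clampIdx_spec t.length (ind + 1)
  by_cases he : ind + 1 = 0
  · have hb : PySem.List.clampIdx t.length (ind + 1) = 0 := by
      rw [if_neg (by omega)] at c2; omega
    rw [hb]; simp
  · have hA : PySem.List.clampIdx t.length (ind + 1 - j) =
        PySem.List.clampIdx t.length (ind + 1) - j.toNat := by
      rcases hc with h | h
      · rw [if_pos (by omega)] at c1
        rw [if_pos (by omega)] at c2
        omega
      · rw [if_neg (by omega)] at c1
        rw [if_neg (by omega)] at c2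
        omega
    rw [hA]

theorem pv_NF_bwd_junk (t : List Char) (ind j : ℤ) (h3 : 3 ≤ j) (h5 : j ≤ 5)
    (hhi : ind < t.length) (hc : 0 ≤ ind) (hc2 : ind + 1 < j) :
    (PySem.List.slice t (some (ind + 1 - j)) (some (ind + 1))).length < 3 := by
  rw [PySem.List.length_slice]
  have c1 := pv_clampIdx_spec t.length (ind + 1 - j)
  have c2 := pv_clampIdx_spec t.length (ind + 1)
  rw [if_pos (by omega)] at c1
  rw [if_neg (by omega)] at c2
  omega

-- decide facts about the word table
theorem pvWL_len : ∀ p ∈ pvWL, 3 ≤ p.1.toList.length ∧ p.1.toList.length ≤ 5 := by decide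
theorem pvWL_len_mem : ∀ p ∈ pvWL, (p.1.toList.length : ℤ) ∈ ([3, 4, 5] : List ℤ) := by decide
theorem pvWL_prefix_free : ∀ p ∈ pvWL, ∀ q ∈ pvWL, p.1.toList <+: q.1.toList → p.1 = q.1 := by decide
theorem pvWL_suffix_free : ∀ p ∈ pvWL, ∀ q ∈ pvWL, p.1.toList <:+ q.1.toList → p.1 = q.1 := by decide
theorem pvWL_key_det : ∀ p ∈ pvWL, ∀ q ∈ pvWL, p.1 = q.1 → p.2 = q.2 := by decide
theorem pvWL_lookup_self : ∀ p ∈ pvWL, pvLookup p.1 = some p.2 := by decide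

theorem pv_lookup_some {x d : String} (h : pvLookup x = some d) :
    ∃ w, (w, d) ∈ pvWL ∧ x = w := by
  unfold pvLookup at h
  rcases Option.map_eq_some_iff.mp h with ⟨p, hp, hd⟩
  obtain ⟨p1, p2⟩ := p
  cases hd
  refine ⟨p1, List.mem_of_find?_eq_some hp, ?_⟩
  have hkey : (p1 == x) = true := by simpa using List.find?_some hp
  exact (beq_iff_eq.mp hkey).symm

-- ===== bridging A's port to the abstract loop over windows =====
theorem pv_goA_win (s : String) (ind : Int) (forward : Bool) (l : List Int) :
    pvGoA s ind forward l = pvLoopA (pvWin s ind forward) (pvFallback s ind) l := by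
  induction l with
  | nil => rfl
  | cons i r ih =>
    cases forward with
    | true =>
      simp only [pvGoA, pvLoopA, pv_getA_eq, ih, pvWin, if_true, sub_zero]
    | false =>
      simp only [pvGoA, pvLoopA, ih, pv_getA_eq, pvWin, if_false, Bool.false_eq_true]
      have e1 : ind - (i - 1) = ind + 1 - i := by ring
      have e2 : ind + i - (i - 1) = ind + 1 := by ring
      rw [e1, e2]

theorem pv_A_loop (s : String) (ind : Int) (forward : Bool) :
    isValidDigit s ind forward =
      pvLoopA (pvWin s ind forward) (pvFallback s ind) ([3, 4, 5] : List ℤ) := by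
  have hrange : PySem.List.pyRange 3 6 1 = ([3, 4, 5] : List ℤ) := by decide
  rw [isValidDigit, hrange, pv_goA_win]

theorem pv_loopA_all_none (m : Int → String) (fb : Option String) (l : List Int)
    (h : ∀ i ∈ l, pvLookup (m i) = none) : pvLoopA m fb l = fb := by
  induction l with
  | nil => rfl
  | cons i r ih =>
    have := h i (by simp)
    simp only [pvLoopA, this]
    exact ih fun i hi => h i (by simp [hi])

theorem pv_loopA_345 (m : Int → String) (fb : Option String) (d : String)
    (hopts : ∀ i ∈ ([3, 4, 5] : List ℤ), pvLookup (m i) = none ∨ pvLookup (m i) = some d)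
    (hhit : ∃ i ∈ ([3, 4, 5] : List ℤ), pvLookup (m i) = some d) :
    pvLoopA m fb [3, 4, 5] = some d := by
  obtain h3 | h3 := hopts 3 (by simp)
    <;> obtain h4 | h4 := hopts 4 (by simp)
    <;> obtain h5 | h5 := hopts 5 (by simp)
    <;> simp only [pvLoopA, h3, h4, h5]
  exfalso
  obtain ⟨i, hi, hsome⟩ := hhit
  simp only [List.mem_cons, List.not_mem_nil, or_false] at hi
  rcases hi with rfl | rfl | rfl <;> simp [h3, h4, h5] at hsome

-- string-level ↔ list-level matching
theorem pv_str_eq_iff (x w : String) : x = w ↔ x.toList = w.toList := String.ext_iff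

-- ===== window-match ⇒ B's test (T1) =====
theorem pv_T1_fwd (s : String) (ind : Int) (hlo : -(s.toList.length : ℤ) ≤ ind)
    (hhi : ind < (s.toList.length : ℤ)) :
    ∀ i ∈ ([3, 4, 5] : List ℤ), ∀ w d, (w, d) ∈ pvWL →
      PySem.Str.slice s (some ind) (some (ind + i)) = w → pvMF s ind w = true := by
  intro i hi w d hw heq
  have hi' : 3 ≤ i ∧ i ≤ 5 := by
    simp only [List.mem_cons, List.not_mem_nil, or_false] at hi
    rcases hi with h | h | h <;> omega
  have hwlen : 3 ≤ w.toList.length ∧ w.toList.length ≤ 5 := pvWL_len (w, d) hw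
  rw [pvMF, beq_iff_eq, pv_str_eq_iff]
  rw [pv_str_eq_iff] at heq
  simp only [PySem.Str.toList_slice, PySem.Chars.slice_eq_listSlice] at heq ⊢
  set t := s.toList with ht
  by_cases hc : 0 ≤ ind ∨ ind + i < 0
  · rw [pv_NF_fwd_pos t ind i hi'.1 hlo hhi hc] at heq
    have hlen_le : w.toList.length ≤ i.toNat := by
      rw [← heq]; simpa using List.length_take_le _ _
    have hlw : PySem.Str.len w = (w.toList.length : ℤ) := rfl
    rw [hlw]
    have hc' : 0 ≤ ind ∨ ind + (w.toList.length : ℤ) < 0 := by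
      rcases hc with h | h
      · exact Or.inl h
      · right; omega
    rw [pv_NF_fwd_pos t ind _ (by omega) hlo hhi hc']
    have hnat : (w.toList.length : ℤ).toNat = w.toList.length := by omega
    rw [hnat]
    have h2 := congrArg (List.take w.toList.length) heq
    rw [List.take_take, min_eq_left hlen_le, List.take_length] at h2
    exact h2
  · push_neg at hc
    have := pv_NF_fwd_junk t ind i hi'.1 hi'.2 hlo hc.1 (by omega)
    rw [heq] at this
    omega

theorem pv_endswith_iff (s w : String) (b : ℤ) :
    PySem.Str.endswith (PySem.Str.slice s none (some b)) w = true ↔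
      w.toList <:+ s.toList.take (PySem.List.clampIdx s.toList.length b) := by
  rw [show PySem.Str.endswith (PySem.Str.slice s none (some b)) w =
      PySem.Chars.endswith (PySem.Str.slice s none (some b)).toList w.toList from rfl]
  rw [PySem.Chars.endswith_iff]
  simp only [PySem.Str.toList_slice, PySem.Chars.slice_eq_listSlice]
  simp [PySem.List.slice]

theorem pv_bwd_to_endswith (s : String) (ind : Int) (hlo : -(s.toList.length : ℤ) ≤ ind)
    (hhi : ind < (s.toList.length : ℤ)) :
    ∀ i ∈ ([3, 4, 5] : List ℤ), ∀ w d, (w, d) ∈ pvWL →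
      PySem.Str.slice s (some (ind + 1 - i)) (some (ind + 1)) = w →
      PySem.Str.endswith (PySem.Str.slice s none (some (ind + 1))) w = true := by
  intro i hi w d hw heq
  have hi' : 3 ≤ i ∧ i ≤ 5 := by
    simp only [List.mem_cons, List.not_mem_nil, or_false] at hi
    rcases hi with h | h | h <;> omega
  have hwlen : 3 ≤ w.toList.length ∧ w.toList.length ≤ 5 := pvWL_len (w, d) hw
  rw [pv_endswith_iff]
  rw [pv_str_eq_iff] at heq
  simp only [PySem.Str.toList_slice, PySem.Chars.slice_eq_listSlice] at heq
  by_cases hc : ind < 0 ∨ i ≤ ind + 1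
  · rw [pv_NF_bwd_pos s.toList ind i hi'.1 hlo hhi hc] at heq
    rw [← heq]
    exact List.drop_suffix _ _
  · push_neg at hc
    have := pv_NF_bwd_junk s.toList ind i hi'.1 hi'.2 hhi hc.1 hc.2
    rw [heq] at this
    omega

theorem pv_endswith_to_bwd (s : String) (ind : Int) (hlo : -(s.toList.length : ℤ) ≤ ind)
    (hhi : ind < (s.toList.length : ℤ)) :
    ∀ w d, (w, d) ∈ pvWL →
      PySem.Str.endswith (PySem.Str.slice s none (some (ind + 1))) w = true →
      PySem.Str.slice s (some (ind + 1 - ((w.toList.length : ℤ)))) (some (ind + 1)) = w := by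
  intro w d hw hb
  have hwlen : 3 ≤ w.toList.length ∧ w.toList.length ≤ 5 := pvWL_len (w, d) hw
  rw [pv_endswith_iff] at hb
  set t := s.toList with ht
  set e := PySem.List.clampIdx t.length (ind + 1) with he
  have hue : (t.take e).length = e := by
    rw [List.length_take]
    exact Nat.min_eq_left (PySem.List.clampIdx_le t.length (ind + 1))
  have hwle : w.toList.length ≤ e := by
    have := hb.length_le; omega
  have hc2 := pv_clampIdx_spec t.length (ind + 1)
  have hc : ind < 0 ∨ ((w.toList.length : ℤ)) ≤ ind + 1 := by
    by_cases h0 : ind < 0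
    · exact Or.inl h0
    · right
      rw [if_neg (by omega)] at hc2
      omega
  rw [pv_str_eq_iff]
  simp only [PySem.Str.toList_slice, PySem.Chars.slice_eq_listSlice]
  rw [pv_NF_bwd_pos t ind _ (by omega) hlo hhi hc, ← he]
  obtain ⟨pre, hpre⟩ := hb
  have hplen : pre.length = e - ((w.toList.length : ℤ)).toNat := by
    have hl := congrArg List.length hpre
    rw [List.length_append, hue] at hl
    omega
  rw [← hpre, ← hplen, List.drop_left]

theorem pv_T1 (s : String) (ind : Int) (forward : Bool)
    (hlo : -(s.toList.length : ℤ) ≤ ind) (hhi : ind < (s.toList.length : ℤ)) :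
    ∀ i ∈ ([3, 4, 5] : List ℤ), ∀ w d, (w, d) ∈ pvWL →
      pvWin s ind forward i = w → pvTest s ind forward w = true := by
  intro i hi w d hw heq
  cases forward with
  | true => exact pv_T1_fwd s ind hlo hhi i hi w d hw heq
  | false =>
    have hes := pv_bwd_to_endswith s ind hlo hhi i hi w d hw heq
    have := pv_endswith_to_bwd s ind hlo hhi w d hw hes
    simp only [pvTest, if_false, Bool.false_eq_true, pvMB]
    rw [beq_iff_eq]
    have hlw : PySem.Str.len w = (w.toList.length : ℤ) := rfl
    rw [hlw]
    exact this

-- ===== B's test ⇒ window-match at the word's own length (T3) =====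
theorem pv_T3 (s : String) (ind : Int) (forward : Bool) (w : String)
    (hb : pvTest s ind forward w = true) :
    pvWin s ind forward ((w.toList.length : ℤ)) = w := by
  cases forward with
  | true =>
    simp only [pvTest, if_true, pvMF, beq_iff_eq] at hb
    simpa only [pvWin, if_true] using hb
  | false =>
    simp only [pvTest, if_false, Bool.false_eq_true, pvMB, beq_iff_eq] at hb
    simpa only [pvWin, if_false, Bool.false_eq_true] using hb

-- ===== uniqueness of the matching word (T2) =====
theorem pv_T2 (s : String) (ind : Int) (forward : Bool)
    (hlo : -(s.toList.length : ℤ) ≤ ind) (hhi : ind < (s.toList.length : ℤ)) :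
    ∀ w d w' d', (w, d) ∈ pvWL → (w', d') ∈ pvWL →
      pvTest s ind forward w = true → pvTest s ind forward w' = true → w = w' := by
  intro w d w' d' hw hw' hb hb'
  cases forward with
  | true =>
    have norm : ∀ wv dv, (wv, dv) ∈ pvWL → pvTest s ind true wv = true →
        wv.toList = (s.toList.drop (PySem.List.clampIdx s.toList.length ind)).take wv.toList.length := by
      intro wv dv hmv hbv
      have hwlen : 3 ≤ wv.toList.length ∧ wv.toList.length ≤ 5 := pvWL_len (wv, dv) hmv
      simp only [pvTest, if_true, pvMF, beq_iff_eq] at hbv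
      rw [pv_str_eq_iff] at hbv
      simp only [PySem.Str.toList_slice, PySem.Chars.slice_eq_listSlice] at hbv
      have hlw : PySem.Str.len wv = (wv.toList.length : ℤ) := rfl
      rw [hlw] at hbv
      by_cases hc : 0 ≤ ind ∨ ind + (wv.toList.length : ℤ) < 0
      · rw [pv_NF_fwd_pos s.toList ind _ (by omega) hlo hhi hc] at hbv
        have : ((wv.toList.length : ℤ)).toNat = wv.toList.length := by omega
        rw [this] at hbv
        exact hbv.symm
      · exfalso
        push_neg at hc
        have := pv_NF_fwd_junk s.toList ind ((wv.toList.length : ℤ)) (by omega) (by omega)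
          hlo hc.1 (by omega)
        have hlen := congrArg List.length hbv
        omega
    have e1 := norm w d hw hb
    have e2 := norm w' d' hw' hb'
    have hpre : w.toList <+: w'.toList ∨ w'.toList <+: w.toList := by
      rcases le_total w.toList.length w'.toList.length with h | h
      · left
        have step : w.toList = w'.toList.take w.toList.length := by
          rw [e2, List.take_take, min_eq_left h]; exact e1
        have hp := List.take_prefix w.toList.length w'.toList
        rwa [← step] at hp
      · right
        have step : w'.toList = w.toList.take w'.toList.length := by
          rw [e1, List.take_take, min_eq_left h]; exact e2
        have hp := List.take_prefix w'.toList.length w.toList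
        rwa [← step] at hp
    rcases hpre with h | h
    · exact pvWL_prefix_free (w, d) hw (w', d') hw' h
    · exact (pvWL_prefix_free (w', d') hw' (w, d) hw h).symm
  | false =>
    have toe : ∀ wv dv, (wv, dv) ∈ pvWL → pvTest s ind false wv = true →
        PySem.Str.endswith (PySem.Str.slice s none (some (ind + 1))) wv = true := by
      intro wv dv hmv hbv
      have hlenm := pvWL_len_mem (wv, dv) hmv
      apply pv_bwd_to_endswith s ind hlo hhi ((wv.toList.length : ℤ)) hlenm wv dv hmv
      exact pv_T3 s ind false wv hbv
    have hbe := toe w d hw hb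
    have hbe' := toe w' d' hw' hb'
    rw [pv_endswith_iff] at hbe hbe'
    rcases le_total w.toList.length w'.toList.length with h | h
    · exact pvWL_suffix_free (w, d) hw (w', d') hw'
        (List.suffix_of_suffix_length_le hbe hbe' h)
    · exact (pvWL_suffix_free (w', d') hw' (w, d) hw
        (List.suffix_of_suffix_length_le hbe' hbe h)).symm

-- ===== the character B dispatches on =====
theorem pv_pyGet_clamp (t : List Char) (ind : ℤ) (hlo : -(t.length : ℤ) ≤ ind)
    (hhi : ind < (t.length : ℤ)) :
    PySem.List.pyGet? t ind = t[PySem.List.clampIdx t.length ind]? := by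
  have hc := pv_clampIdx_spec t.length ind
  by_cases h0 : 0 ≤ ind
  · rw [PySem.List.pyGet?_of_nonneg t h0]
    congr 1
    rw [if_neg (by omega)] at hc
    omega
  · have hneg := PySem.List.pyGet?_neg_natCast t ((-ind).toNat) (by omega) (by omega)
    rw [show (-(((-ind).toNat : ℕ) : ℤ)) = ind by omega] at hneg
    rw [hneg]
    congr 1
    rw [if_pos (by omega)] at hc
    omega

-- forward: a matching word's first character is s[ind]
theorem pv_char_fwd (s : String) (ind : Int) (w : String)
    (hlo : -(s.toList.length : ℤ) ≤ ind) (hhi : ind < (s.toList.length : ℤ))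
    (h3 : 3 ≤ w.toList.length) (h5 : w.toList.length ≤ 5)
    (hb : pvMF s ind w = true) :
    PySem.Str.pyGet? s ind = w.toList[0]? := by
  rw [pvMF, beq_iff_eq, pv_str_eq_iff] at hb
  simp only [PySem.Str.toList_slice, PySem.Chars.slice_eq_listSlice] at hb
  set t := s.toList with ht
  have hget : PySem.Str.pyGet? s ind = PySem.List.pyGet? t ind := rfl
  have hlw : PySem.Str.len w = (w.toList.length : ℤ) := rfl
  rw [hlw] at hb
  by_cases hc : 0 ≤ ind ∨ ind + (w.toList.length : ℤ) < 0
  · rw [pv_NF_fwd_pos t ind _ (by omega) hlo hhi hc] at hb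
    set k := PySem.List.clampIdx t.length ind with hk
    rw [hget, pv_pyGet_clamp t ind hlo hhi, ← hk]
    have h0 := congrArg (fun l => l[0]?) hb
    simp only at h0
    rw [← h0, List.getElem?_take, if_pos (by omega), List.getElem?_drop]
    simp
  · exfalso
    push_neg at hc
    have := pv_NF_fwd_junk t ind ((w.toList.length : ℤ)) (by omega) (by omega) hlo hc.1 (by omega)
    have hlen := congrArg List.length hb
    omega

-- backward: a matching word's last character is s[ind]
theorem pv_char_bwd (s : String) (ind : Int) (w : String)
    (hlo : -(s.toList.length : ℤ) ≤ ind) (hhi : ind < (s.toList.length : ℤ))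
    (h3 : 3 ≤ w.toList.length) (h5 : w.toList.length ≤ 5)
    (hb : pvMB s ind w = true) :
    PySem.Str.pyGet? s ind = w.toList[w.toList.length - 1]? := by
  rw [pvMB, beq_iff_eq, pv_str_eq_iff] at hb
  simp only [PySem.Str.toList_slice, PySem.Chars.slice_eq_listSlice] at hb
  set t := s.toList with ht
  have hget : PySem.Str.pyGet? s ind = PySem.List.pyGet? t ind := rfl
  have hlw : PySem.Str.len w = (w.toList.length : ℤ) := rfl
  rw [hlw] at hb
  by_cases hc : ind < 0 ∨ ((w.toList.length : ℤ)) ≤ ind + 1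
  · rw [pv_NF_bwd_pos t ind _ (by omega) hlo hhi hc] at hb
    set e := PySem.List.clampIdx t.length (ind + 1) with he
    have hele : e ≤ t.length := PySem.List.clampIdx_le t.length (ind + 1)
    set jn := w.toList.length with hj
    have hjn : ((jn : ℤ)).toNat = jn := by omega
    rw [hjn] at hb
    have hlen := congrArg List.length hb
    simp only [List.length_drop, List.length_take] at hlen
    have hje : jn ≤ e := by omega
    have hc2 := pv_clampIdx_spec t.length (ind + 1)
    have hc1 := pv_clampIdx_spec t.length ind
    have hind : PySem.List.clampIdx t.length ind = e - 1 := by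
      by_cases h0 : 0 ≤ ind
      · rw [if_neg (by omega)] at hc1
        rw [if_neg (by omega)] at hc2
        omega
      · rw [if_pos (by omega)] at hc1
        by_cases h1 : ind + 1 < 0
        · rw [if_pos h1] at hc2
          omega
        · rw [if_neg h1] at hc2
          omega
    rw [hget, pv_pyGet_clamp t ind hlo hhi, hind]
    have h0 := congrArg (fun l => l[jn - 1]?) hb
    simp only at h0
    rw [← h0, List.getElem?_drop, List.getElem?_take, if_pos (by omega)]
    congr 1
    omega
  · exfalso
    push_neg at hc
    have := pv_NF_bwd_junk t ind ((w.toList.length : ℤ)) (by omega) (by omega) hhi hc.1 hc.2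
    have hlen := congrArg List.length hb
    omega

-- ===== B's evaluation =====
theorem pv_B_nomatch (s : String) (ind : Int) (forward : Bool)
    (hall : ∀ p ∈ pvWL, pvTest s ind forward p.1 = false) :
    isValidDigit_alt s ind forward = pvFallback s ind := by
  cases forward with
  | true =>
    have h1 : pvMF s ind "one" = false := by simpa [pvTest] using hall ("one","1") (by decide)
    have h2 : pvMF s ind "two" = false := by simpa [pvTest] using hall ("two","2") (by decide)
    have h3 : pvMF s ind "three" = false := by simpa [pvTest] using hall ("three","3") (by decide)
    have h4 : pvMF s ind "four" = false := by simpa [pvTest] using hall ("four","4") (by decide)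
    have h5 : pvMF s ind "five" = false := by simpa [pvTest] using hall ("five","5") (by decide)
    have h6 : pvMF s ind "six" = false := by simpa [pvTest] using hall ("six","6") (by decide)
    have h7 : pvMF s ind "seven" = false := by simpa [pvTest] using hall ("seven","7") (by decide)
    have h8 : pvMF s ind "eight" = false := by simpa [pvTest] using hall ("eight","8") (by decide)
    have h9 : pvMF s ind "nine" = false := by simpa [pvTest] using hall ("nine","9") (by decide)
    cases hg : PySem.List.pyGet? s.toList ind with
    | none => simp [isValidDigit_alt, pvFallback, hg]
    | some c =>
      simp only [isValidDigit_alt, pvFallback, PySem.Str.pyGet?_eq,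
        PySem.Chars.pyGet?_eq_listPyGet?, hg, h1, h2, h3, h4, h5, h6, h7, h8, h9,
        Bool.false_eq_true, if_false, if_true]
      split_ifs <;> rfl
  | false =>
    have h1 : pvMB s ind "one" = false := by simpa [pvTest] using hall ("one","1") (by decide)
    have h2 : pvMB s ind "two" = false := by simpa [pvTest] using hall ("two","2") (by decide)
    have h3 : pvMB s ind "three" = false := by simpa [pvTest] using hall ("three","3") (by decide)
    have h4 : pvMB s ind "four" = false := by simpa [pvTest] using hall ("four","4") (by decide)
    have h5 : pvMB s ind "five" = false := by simpa [pvTest] using hall ("five","5") (by decide)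
    have h6 : pvMB s ind "six" = false := by simpa [pvTest] using hall ("six","6") (by decide)
    have h7 : pvMB s ind "seven" = false := by simpa [pvTest] using hall ("seven","7") (by decide)
    have h8 : pvMB s ind "eight" = false := by simpa [pvTest] using hall ("eight","8") (by decide)
    have h9 : pvMB s ind "nine" = false := by simpa [pvTest] using hall ("nine","9") (by decide)
    cases hg : PySem.List.pyGet? s.toList ind with
    | none => simp [isValidDigit_alt, pvFallback, hg]
    | some c =>
      simp only [isValidDigit_alt, pvFallback, PySem.Str.pyGet?_eq,
        PySem.Chars.pyGet?_eq_listPyGet?, hg, h1, h2, h3, h4, h5, h6, h7, h8, h9,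
        Bool.false_eq_true, if_false, if_true]
      split_ifs <;> rfl

theorem pv_B_match (s : String) (ind : Int) (forward : Bool) (w d : String)
    (hlo : -(s.toList.length : ℤ) ≤ ind) (hhi : ind < (s.toList.length : ℤ))
    (hmem : (w, d) ∈ pvWL) (hb : pvTest s ind forward w = true)
    (huniq : ∀ w' d', (w', d') ∈ pvWL → pvTest s ind forward w' = true → w' = w) :
    isValidDigit_alt s ind forward = some d := by
  have hfalse : ∀ w' d', (w', d') ∈ pvWL → w' ≠ w → pvTest s ind forward w' = false := by
    intro w' d' hm hne
    cases hv : pvTest s ind forward w' with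
    | false => rfl
    | true => exact absurd (huniq w' d' hm hv) hne
  cases forward with
  | true =>
    have hMF : pvMF s ind w = true := by simpa [pvTest] using hb
    have hwlen := pvWL_len (w, d) hmem
    have hchar := pv_char_fwd s ind w hlo hhi hwlen.1 hwlen.2 hMF
    have hF : ∀ w' d', (w', d') ∈ pvWL → w' ≠ w → pvMF s ind w' = false := by
      intro w' d' hm hne; simpa [pvTest] using hfalse w' d' hm hne
    fin_cases hmem
    · simp_all [isValidDigit_alt]
    · simp_all [isValidDigit_alt]
    · have hx := hF "two" "2" (by decide) (by decide)
      simp_all [isValidDigit_alt]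
    · simp_all [isValidDigit_alt]
    · have hx := hF "four" "4" (by decide) (by decide)
      simp_all [isValidDigit_alt]
    · simp_all [isValidDigit_alt]
    · have hx := hF "six" "6" (by decide) (by decide)
      simp_all [isValidDigit_alt]
    · simp_all [isValidDigit_alt]
    · simp_all [isValidDigit_alt]
  | false =>
    have hMB : pvMB s ind w = true := by simpa [pvTest] using hb
    have hwlen := pvWL_len (w, d) hmem
    have hchar := pv_char_bwd s ind w hlo hhi hwlen.1 hwlen.2 hMB
    have hF : ∀ w' d', (w', d') ∈ pvWL → w' ≠ w → pvMB s ind w' = false := by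
      intro w' d' hm hne; simpa [pvTest] using hfalse w' d' hm hne
    fin_cases hmem
    · simp_all [isValidDigit_alt]
    · simp_all [isValidDigit_alt]
    · have hx := hF "one" "1" (by decide) (by decide)
      simp_all [isValidDigit_alt]
    · simp_all [isValidDigit_alt]
    · have hx1 := hF "one" "1" (by decide) (by decide)
      have hx2 := hF "three" "3" (by decide) (by decide)
      simp_all [isValidDigit_alt]
    · simp_all [isValidDigit_alt]
    · simp_all [isValidDigit_alt]
    · simp_all [isValidDigit_alt]
    · have hx1 := hF "one" "1" (by decide) (by decide)
      have hx2 := hF "three" "3" (by decide) (by decide)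
      have hx3 := hF "five" "5" (by decide) (by decide)
      simp_all [isValidDigit_alt]

-- ===== main theorem =====
theorem pv_main (s : String) (ind : Int) (forward : Bool)
    (hpre : Pre_isValidDigit s ind forward) :
    isValidDigit s ind forward = isValidDigit_alt s ind forward := by
  obtain ⟨hlo, hhi⟩ := hpre
  rw [pv_A_loop]
  by_cases hex : ∃ p ∈ pvWL, pvTest s ind forward p.1 = true
  · obtain ⟨⟨w, d⟩, hmem, hbt⟩ := hex
    have huniq : ∀ w' d', (w', d') ∈ pvWL → pvTest s ind forward w' = true → w' = w := by
      intro w' d' hm hv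
      exact pv_T2 s ind forward hlo hhi w' d' w d hm hmem hv hbt
    rw [pv_B_match s ind forward w d hlo hhi hmem hbt huniq]
    apply pv_loopA_345
    · intro i hi
      cases hlk : pvLookup (pvWin s ind forward i) with
      | none => exact Or.inl rfl
      | some d' =>
        right
        obtain ⟨w', hw'mem, hxw⟩ := pv_lookup_some hlk
        have hb' := pv_T1 s ind forward hlo hhi i hi w' d' hw'mem hxw
        have hww : w' = w := huniq w' d' hw'mem hb'
        subst hww
        have hd : d' = d := pvWL_key_det (w', d') hw'mem (w', d) hmem rfl
        rw [hd]
    · refine ⟨(w.toList.length : ℤ), pvWL_len_mem (w, d) hmem, ?_⟩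
      rw [pv_T3 s ind forward w hbt]
      exact pvWL_lookup_self (w, d) hmem
  · push_neg at hex
    have hfalse : ∀ p ∈ pvWL, pvTest s ind forward p.1 = false := by
      intro p hp
      exact Bool.eq_false_iff.mpr fun hc => (hex p hp) hc
    rw [pv_B_nomatch s ind forward hfalse]
    apply pv_loopA_all_none
    intro i hi
    cases hlk : pvLookup (pvWin s ind forward i) with
    | none => rfl
    | some d' =>
      exfalso
      obtain ⟨w', hw'mem, hxw⟩ := pv_lookup_some hlk
      have := pv_T1 s ind forward hlo hhi i hi w' d' hw'mem hxw
      rw [hfalse (w', d') hw'mem] at this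
      exact Bool.false_ne_true this

-- ===== VERDICT (by name: the statement is the Claim_ definition above) =====
theorem isValidDigit_spec : Claim_equal_isValidDigit := by
  intro s ind forward _ hpre
  unfold Spec_isValidDigit
  exact pv_main s ind forward hpre
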